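-- pv_equiv track=rewrite | github.com/ratnaparkhivivek10/interview_questions | nuance/str_reverse.py | str_reverse
-- ===== SOURCE A (Python) =====
-- def str_reverse(s):
--     special_chars = '!"#$%&\'()*+,-./:;<=>?@[\\]^_`{|}~'
--
--     prefix = ''
--     suffix = ''
--     flag = 0
--
--     for c in s:
--         if c in special_chars:
--             prefix = prefix + c
--             flag = 1
--         else:
--             if flag:
--                 suffix = c + suffix
--             else:
--                 prefix = c + prefix
--
--     return prefix + suffix
-- ===== SOURCE B (Python) =====
-- def str_reverse(s):
--     special_chars = '!"#$%&\'()*+,-./:;<=>?@[\\]^_`{|}~'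
--     p = next((i for i, c in enumerate(s) if c in special_chars), None)
--     if p is None:
--         return s[::-1]
--     specials = ''.join(c for c in s if c in special_chars)
--     trailing = ''.join(c for c in s[p:] if c not in special_chars)[::-1]
--     return s[:p][::-1] + specials + trailing
-- ===== Notes on version B (the rewrite author's own statement) =====
-- stated objective: faster
-- what changed: Replaces A's single-pass flag machine that grows prefix/suffix by repeated string concatenation with a locate-then-split strategy: find the first special character, then build the result from three explicit pieces (reversed leading normals, all specials in order, reversed trailing normals) via slices and joins.
import Mathlib
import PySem

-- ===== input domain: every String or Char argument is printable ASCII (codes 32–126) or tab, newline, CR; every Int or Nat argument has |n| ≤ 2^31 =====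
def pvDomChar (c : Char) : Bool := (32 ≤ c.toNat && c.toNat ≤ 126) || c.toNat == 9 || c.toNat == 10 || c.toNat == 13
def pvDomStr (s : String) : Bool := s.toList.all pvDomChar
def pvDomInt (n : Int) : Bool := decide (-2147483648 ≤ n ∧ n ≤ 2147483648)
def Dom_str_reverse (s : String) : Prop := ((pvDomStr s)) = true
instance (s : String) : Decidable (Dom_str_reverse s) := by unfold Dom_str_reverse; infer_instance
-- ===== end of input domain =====

-- B replaces A's flag-tracking prepend/append pass (quadratic repeated concatenation) by an
-- explicit locate-then-split construction from slices and joins (measured faster in a timing run).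

-- the module's special_chars literal, and Python's 'c in special_chars' (shared by both ports)
def pvSpecialChars : String := "!\"#$%&'()*+,-./:;<=>?@[\\]^_`{|}~"
def pvIsSpecial (c : Char) : Bool := pvSpecialChars.toList.contains c

-- ===== PORT A =====
-- one iteration of A's for-loop over state (prefix, suffix, flag)
def pvStepA (st : String × String × Int) (c : Char) : String × String × Int :=
  if pvIsSpecial c then (st.1 ++ String.ofList [c], st.2.1, 1)
  else if st.2.2 ≠ 0 then (st.1, String.ofList [c] ++ st.2.1, st.2.2)
  else (String.ofList [c] ++ st.1, st.2.1, st.2.2)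

def str_reverse (s : String) : String :=
  let r := s.toList.foldl pvStepA ("", "", 0)
  r.1 ++ r.2.1

-- ===== PORT B =====
def str_reverse_alt (s : String) : String :=
  let cs := s.toList
  match cs.findIdx? pvIsSpecial with
  | none => String.ofList cs.reverse
  | some p =>
      String.ofList (cs.take p).reverse
        ++ String.ofList (cs.filter pvIsSpecial)
        ++ String.ofList (((cs.drop p).filter (fun c => !pvIsSpecial c)).reverse)

-- ===== PRECONDITION & SPEC =====
def Spec_str_reverse (s : String) (out : String) : Prop := out = str_reverse_alt s
instance (s : String) (out : String) : Decidable (Spec_str_reverse s out) := by unfold Spec_str_reverse; infer_instance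

-- ===== CLAIM (what is proved, stated in full; the proofs are below) =====
def Claim_equal_str_reverse : Prop := ∀ (s : String), Dom_str_reverse s → Spec_str_reverse s (str_reverse s)

-- ===== LEMMAS AND PROOFS =====

@[simp] theorem pvOfListCons (c : Char) (l : List Char) :
    String.ofList [c] ++ String.ofList l = String.ofList (c :: l) := by
  simp only [← String.ofList_append, List.singleton_append]

-- once the flag is set, specials are appended to the prefix and normals prepended to the suffix
theorem pvFoldFlag (l : List Char) : ∀ (pre suf : String),
    l.foldl pvStepA (pre, suf, 1) =
      (pre ++ String.ofList (l.filter pvIsSpecial),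
       String.ofList ((l.filter (fun c => !pvIsSpecial c)).reverse) ++ suf, 1) := by
  induction l with
  | nil => intro pre suf; simp [List.foldl]
  | cons c l ih =>
    intro pre suf
    by_cases h : pvIsSpecial c = true <;>
      simp [List.foldl, pvStepA, h, ih, String.append_assoc]

-- before the first special char, normals are prepended to the prefix
theorem pvFoldNoFlag (l : List Char) : ∀ (pre suf : String),
    l.foldl pvStepA (pre, suf, 0) =
      match l.findIdx? pvIsSpecial with
      | none => (String.ofList l.reverse ++ pre, suf, 0)
      | some p =>
          (String.ofList (l.take p).reverse ++ pre ++
             String.ofList ((l.drop p).filter pvIsSpecial),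
           String.ofList (((l.drop p).filter (fun c => !pvIsSpecial c)).reverse) ++ suf, 1) := by
  induction l with
  | nil => intro pre suf; simp [List.foldl, List.findIdx?_nil]
  | cons c l ih =>
    intro pre suf
    by_cases h : pvIsSpecial c = true
    · simp [List.foldl, pvStepA, h, pvFoldFlag, List.findIdx?_cons, String.append_assoc]
    · rcases hfi : l.findIdx? pvIsSpecial with _ | q <;>
        simp [List.foldl, pvStepA, h, ih, hfi, List.findIdx?_cons, String.append_assoc]

-- all specials of l lie at or after the first-special index
theorem pvDropFilter (l : List Char) : ∀ (p : Nat), l.findIdx? pvIsSpecial = some p →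
    (l.drop p).filter pvIsSpecial = l.filter pvIsSpecial := by
  induction l with
  | nil => intro p h; simp [List.findIdx?_nil] at h
  | cons c l ih =>
    intro p h
    by_cases hc : pvIsSpecial c = true
    · simp [List.findIdx?_cons, hc] at h
      subst h; simp
    · simp [List.findIdx?_cons, hc, Option.map_eq_some_iff] at h
      rcases h with ⟨q, hq, rfl⟩
      simp [hc, ih q hq]

-- ===== VERDICT (by name: the statement is the Claim_ definition above) =====
theorem str_reverse_spec : Claim_equal_str_reverse := by
  intro s _
  show str_reverse s = str_reverse_alt s
  unfold str_reverse str_reverse_alt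
  rw [pvFoldNoFlag]
  rcases hfi : s.toList.findIdx? pvIsSpecial with _ | p
  · simp [hfi]
  · simp [hfi, pvDropFilter s.toList p hfi, String.append_assoc]
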